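-- pv_equiv track=rewrite | github.com/shivalidalmia/MastersDataScience-UST | Python/Python Misc Programs/gene.py | is_valid_DNA
-- ===== SOURCE A (Python) =====
-- def is_valid_DNA(seq):
--     invalid_bases = {}
--     valid = True
--     valid_bases = ['A','C','G','T']
--     for index in range(len(seq)):
--         if seq[index] not in valid_bases:
--             valid = False
--             if seq[index] not in invalid_bases:
--                 invalid_bases[seq[index]] = [index]
--             else:
--                 invalid_bases[seq[index]].append(index)
--
--     return (valid,invalid_bases)
-- ===== SOURCE B (Python) =====
-- def is_valid_DNA(seq):
--     bad = list(dict.fromkeys(c for c in seq if c not in 'ACGT'))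
--     invalid_bases = {b: [i for i, c in enumerate(seq) if c == b] for b in bad}
--     return (not invalid_bases, invalid_bases)
-- ===== Notes on version B (the rewrite author's own statement) =====
-- stated objective: simpler
-- what changed: Replaces the single incremental pass that mutates a flag and appends to dict entries with a declarative two-stage build: ordered-dedup the invalid characters first, then one dict comprehension collecting each bad base's positions by rescanning, with validity read off as dict emptiness.
import Mathlib
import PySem

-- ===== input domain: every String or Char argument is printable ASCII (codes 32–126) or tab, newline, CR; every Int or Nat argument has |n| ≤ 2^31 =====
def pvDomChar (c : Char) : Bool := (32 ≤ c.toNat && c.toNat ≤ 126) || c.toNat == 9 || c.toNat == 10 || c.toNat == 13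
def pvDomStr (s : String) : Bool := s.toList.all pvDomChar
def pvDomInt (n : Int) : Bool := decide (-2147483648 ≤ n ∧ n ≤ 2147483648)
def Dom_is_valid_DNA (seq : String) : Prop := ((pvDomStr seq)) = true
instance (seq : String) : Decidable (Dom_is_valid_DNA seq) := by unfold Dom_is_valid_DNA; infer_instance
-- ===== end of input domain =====

-- B replaces A's single mutating pass (valid flag + incremental dict appends) by a
-- two-stage build: ordered dedup of the invalid characters, then a per-base position
-- comprehension; validity is read off as dict emptiness. Objective: simpler.

-- ===== PORT A =====
-- A's one-character strings seq[index] are represented as Char and turned into the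
-- dict's String key with String.ofList [·] at the point of use (exact on every input).
def is_valid_DNA (seq : String) : Bool × (List (String × List Int)) :=
  let st := (PySem.List.pyRange 0 (PySem.Str.len seq) 1).foldl
    (fun (st : Bool × PySem.Dict String (List Int)) index =>
      let c := PySem.List.pyGetD seq.toList index ' '
      if c ∈ (['A','C','G','T'] : List Char) then st
      else
        (false,
          match st.2.get? (String.ofList [c]) with
          | none => st.2.insert (String.ofList [c]) [index]
          | some l => st.2.insert (String.ofList [c]) (l ++ [index]))
    ) (true, PySem.Dict.empty)
  (st.1, st.2.items)

-- ===== PORT B =====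
def is_valid_DNA_alt (seq : String) : Bool × (List (String × List Int)) :=
  let cs := seq.toList
  let bad := PySem.List.dedup (cs.filter (fun c => ¬ c ∈ (['A','C','G','T'] : List Char)))
  let invalid_bases := bad.map (fun b =>
    (String.ofList [b], (PySem.List.enumerate cs 0).filterMap
      (fun p => if p.2 = b then some p.1 else none)))
  (invalid_bases.isEmpty, invalid_bases)

-- ===== PRECONDITION & SPEC =====
def Spec_is_valid_DNA (seq : String) (out : Bool × (List (String × List Int))) : Prop := out = is_valid_DNA_alt seq
instance (seq : String) (out : Bool × (List (String × List Int))) : Decidable (Spec_is_valid_DNA seq out) := by unfold Spec_is_valid_DNA; infer_instance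

-- ===== CLAIM (what is proved, stated in full; the proofs are below) =====
def Claim_equal_is_valid_DNA : Prop := ∀ (seq : String), Dom_is_valid_DNA seq → Spec_is_valid_DNA seq (is_valid_DNA seq)

-- ===== LEMMAS AND PROOFS =====

def pvVB : List Char := ['A','C','G','T']

def pvKey (c : Char) : String := String.ofList [c]

-- A's loop body, as a function of the (index, character) pair
def pvStep (st : Bool × PySem.Dict String (List Int)) (p : Int × Char) :
    Bool × PySem.Dict String (List Int) :=
  if p.2 ∈ pvVB then st
  else
    (false,
      match st.2.get? (pvKey p.2) with
      | none => st.2.insert (pvKey p.2) [p.1]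
      | some l => st.2.insert (pvKey p.2) (l ++ [p.1]))

def pvF (v : Bool) (p : Int × Char) : Bool := if p.2 ∈ pvVB then v else false

def pvG (d : PySem.Dict String (List Int)) (p : Int × Char) : PySem.Dict String (List Int) :=
  if p.2 ∈ pvVB then d else d.modify (pvKey p.2) [] (· ++ [p.1])

theorem pvKey_injective : Function.Injective pvKey := by
  intro a b h
  have := congrArg String.toList h
  simpa [pvKey] using this

theorem pvStep_eq (st : Bool × PySem.Dict String (List Int)) (p : Int × Char) :
    pvStep st p = (pvF st.1 p, pvG st.2 p) := by
  by_cases h : p.2 ∈ pvVB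
  · simp [pvStep, pvF, pvG, h]
  · cases hg : st.2.get? (pvKey p.2) <;>
      simp [pvStep, pvF, pvG, h, hg, PySem.Dict.modify, PySem.Dict.getD_eq_get?_getD]

theorem pvFoldF (l : List (Int × Char)) (v : Bool) :
    l.foldl pvF v = (v && l.all (fun p => decide (p.2 ∈ pvVB))) := by
  induction l generalizing v with
  | nil => simp
  | cons x xs ih =>
    by_cases h : x.2 ∈ pvVB <;> simp [pvF, h, ih]

theorem pvFoldG (l : List (Int × Char)) (d : PySem.Dict String (List Int)) :
    l.foldl pvG d =
      (l.filter (fun p => !decide (p.2 ∈ pvVB))).foldl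
        (fun d p => d.modify (pvKey p.2) [] (· ++ [p.1])) d := by
  induction l generalizing d with
  | nil => simp
  | cons x xs ih =>
    by_cases h : x.2 ∈ pvVB <;> simp [pvG, h, ih]

theorem pvSet_ofList_map {α κ : Type} [BEq α] [LawfulBEq α] [BEq κ] [LawfulBEq κ]
    (f : α → κ) (hf : Function.Injective f) (xs : List α) (acc : List α) :
    List.foldl PySem.Set.add (acc.map f) (xs.map f) =
      (List.foldl PySem.Set.add acc xs).map f := by
  induction xs generalizing acc with
  | nil => simp
  | cons x xs ih =>
    have hmem : (f x ∈ acc.map f) ↔ (x ∈ acc) := by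
      constructor
      · intro h
        rcases List.mem_map.1 h with ⟨y, hy, hxy⟩
        exact (hf hxy) ▸ hy
      · intro h; exact List.mem_map_of_mem h
    by_cases h : x ∈ acc
    · simpa [PySem.Set.add, hmem, h] using ih acc
    · simpa [PySem.Set.add, hmem, h] using ih (acc ++ [x])

theorem pvFilterMap_eq (l : List (Int × Char)) (b : Char) :
    l.filterMap (fun p => if p.2 = b then some p.1 else none) =
      (l.filter (fun p => decide (p.2 = b))).map (fun p => p.1) := by
  induction l with
  | nil => simp
  | cons x xs ih =>
    by_cases h : x.2 = b <;> simp [h, ih]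

theorem pvOfList_map {α κ : Type} [BEq α] [LawfulBEq α] [BEq κ] [LawfulBEq κ]
    (f : α → κ) (hf : Function.Injective f) (xs : List α) :
    PySem.Set.ofList (xs.map f) = (PySem.Set.ofList xs).map f := by
  have h := pvSet_ofList_map f hf xs []
  simpa [PySem.Set.ofList_eq_foldl] using h

theorem pvFlag (cs : List Char) :
    (PySem.List.enumerate cs 0).all (fun p => decide (p.2 ∈ pvVB)) =
      (PySem.List.dedup (cs.filter (fun c => !decide (c ∈ pvVB)))).isEmpty := by
  have h1 : (PySem.List.enumerate cs 0).all (fun p => decide (p.2 ∈ pvVB)) =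
      cs.all (fun c => decide (c ∈ pvVB)) := by
    conv_rhs => rw [← PySem.List.map_snd_enumerate cs 0]
    rw [List.all_map]
    rfl
  rw [h1, Bool.eq_iff_iff]
  simp only [List.all_eq_true, List.isEmpty_iff, List.eq_nil_iff_forall_not_mem,
    PySem.List.mem_dedup, List.mem_filter]
  constructor
  · rintro h c ⟨hc, hbad⟩
    simp [h c hc] at hbad
  · intro h c hc
    by_contra hb
    exact h c ⟨hc, by simpa using hb⟩

theorem is_valid_DNA_spec_aux (seq : String) :
    is_valid_DNA seq = is_valid_DNA_alt seq := by
  -- the A fold, re-read over enumerate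
  have hA : is_valid_DNA seq
      = (((PySem.List.enumerate seq.toList 0).foldl pvStep (true, PySem.Dict.empty)).1,
         ((PySem.List.enumerate seq.toList 0).foldl pvStep (true, PySem.Dict.empty)).2.items) := by
    unfold is_valid_DNA
    rw [PySem.List.enumerate_eq_map_pyRange seq.toList ' ', List.foldl_map]
    simp only [PySem.Str.len_eq, PySem.List.len_eq, pvStep, pvKey, pvVB]
  rw [hA]
  -- split the fold into flag and dict
  have hsplit : (PySem.List.enumerate seq.toList 0).foldl pvStep (true, PySem.Dict.empty)
      = ((PySem.List.enumerate seq.toList 0).foldl pvF true,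
         (PySem.List.enumerate seq.toList 0).foldl pvG PySem.Dict.empty) := by
    have h : pvStep = fun st p => (pvF st.1 p, pvG st.2 p) :=
      funext fun st => funext (pvStep_eq st)
    rw [h, PySem.List.foldl_prod_mk]
  rw [hsplit]
  set cs := seq.toList with hcs
  set E := PySem.List.enumerate cs 0 with hE
  set q : Int × Char → Bool := fun p => !decide (p.2 ∈ pvVB) with hq
  set bads := E.filter q with hbads
  set D := bads.foldl (fun d p => d.modify (pvKey p.2) [] (· ++ [p.1])) PySem.Dict.empty with hD
  -- the dict fold
  have hdict : E.foldl pvG PySem.Dict.empty = D := pvFoldG E PySem.Dict.empty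
  -- keys of D
  have hkeys : D.keys = PySem.Set.ofList (bads.map (fun p => pvKey p.2)) := by
    rw [hD, PySem.Dict.keys_foldl_modify_key bads (fun p => pvKey p.2) [] (fun _ p => (· ++ [p.1]))]
    simp [PySem.Dict.keys_empty, PySem.Set.update, PySem.Set.ofList_eq_foldl]
  have hnodup : D.keys.Nodup := by
    rw [hD]
    exact PySem.Dict.nodup_keys_foldl_modify_key bads (fun p => pvKey p.2) [] (fun _ p => (· ++ [p.1]))
      PySem.Dict.empty (by simp [PySem.Dict.keys_empty])
  -- bad characters
  set bad := PySem.List.dedup (cs.filter (fun c => !decide (c ∈ pvVB))) with hbad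
  have hsnd : bads.map (fun p => p.2) = cs.filter (fun c => !decide (c ∈ pvVB)) := by
    rw [hbads, hq]
    conv_rhs => rw [← PySem.List.map_snd_enumerate cs 0]
    rw [List.filter_map]
    rfl
  have hkeys2 : D.keys = bad.map pvKey := by
    rw [hkeys, hbad, PySem.List.dedup_eq_ofList, ← pvOfList_map pvKey pvKey_injective, ← hsnd]
    congr 1
    simp [Function.comp]
  -- positions stored under each bad character
  have hval : ∀ b ∈ bad, D.getD (pvKey b) [] =
      E.filterMap (fun p => if p.2 = b then some p.1 else none) := by
    intro b hb
    have hb2 : b ∈ cs.filter (fun c => !decide (c ∈ pvVB)) := by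
      rw [hbad] at hb
      exact (PySem.List.mem_dedup _ b).1 hb
    have hbnot : decide (b ∈ pvVB) = false := by
      have := (List.mem_filter.1 hb2).2
      simpa using this
    have hDp : D = (bads.map (fun p => (pvKey p.2, p.1))).foldl
        (fun d r => d.modify r.1 [] (· ++ [r.2])) PySem.Dict.empty := by
      rw [hD, List.foldl_map]
    rw [hDp, PySem.Dict.getD_foldl_modify_append]
    rw [List.filter_map]
    have hfc : ((fun r : String × Int => r.1 == pvKey b) ∘ (fun p : Int × Char => (pvKey p.2, p.1)))
        = fun p : Int × Char => pvKey p.2 == pvKey b := rfl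
    rw [hfc]
    have hpred : bads.filter (fun p => pvKey p.2 == pvKey b)
        = bads.filter (fun p => decide (p.2 = b)) := by
      apply List.filter_congr
      intro x _
      by_cases h : x.2 = b
      · simp [h]
      · have : pvKey x.2 ≠ pvKey b := fun hc => h (pvKey_injective hc)
        simp [h, this]
    rw [hpred, hbads, List.filter_filter]
    have hpred2 : E.filter (fun a => decide (a.2 = b) && q a) = E.filter (fun a => decide (a.2 = b)) := by
      apply List.filter_congr
      intro x _
      by_cases h : x.2 = b
      · simp [h, hq, hbnot]
      · simp [h]
    rw [hpred2, pvFilterMap_eq E b]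
    simp [PySem.Dict.getD_empty, List.map_map]
  -- assemble
  unfold is_valid_DNA_alt
  dsimp only
  rw [show (['A','C','G','T'] : List Char) = pvVB from rfl]
  simp only [decide_not]
  rw [← hcs, hdict]
  refine Prod.ext ?_ ?_
  · rw [pvFoldF, Bool.true_and, List.isEmpty_map]
    exact pvFlag cs
  · rw [PySem.Dict.items_eq_map_keys D hnodup [], hkeys2, List.map_map]
    apply List.map_congr_left
    intro b hb
    dsimp only [Function.comp]
    rw [hval b hb]
    rfl

-- ===== VERDICT (by name: the statement is the Claim_ definition above) =====
theorem is_valid_DNA_spec : Claim_equal_is_valid_DNA := by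
  intro seq _
  exact is_valid_DNA_spec_aux seq
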